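-- pv_equiv track=rewrite | github.com/dododoyo/Competitive-Programming | 0000CodeForces/A_Almost_Prime.py | isAlmostPrime
-- ===== SOURCE A (Python) =====
-- from collections import defaultdict
--
-- def isAlmostPrime(i):
--   factors,d = defaultdict(int),2
--   while d*d <= i:
--     while i%d == 0:
--       factors[d] += 1
--       i //= d
--     d += 1
--   if i > 1:
--     factors[i] += 1
--   return len(factors) == 1
-- ===== SOURCE B (Python) =====
-- def isAlmostPrime(i):
--   d = 2
--   while d * d <= i:
--     if i % d == 0:
--       while i % d == 0:
--         i //= d
--       return i == 1
--     d += 1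
--   return i > 1
-- ===== Notes on version B (the rewrite author's own statement) =====
-- stated objective: simpler
-- what changed: B replaces A's factor-counting dict with a direct prime-power test: it divides out the first divisor found and immediately returns whether the cofactor is 1, or i > 1 if no divisor exists; no dict and no continued scan after the first factor.
import Mathlib
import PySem

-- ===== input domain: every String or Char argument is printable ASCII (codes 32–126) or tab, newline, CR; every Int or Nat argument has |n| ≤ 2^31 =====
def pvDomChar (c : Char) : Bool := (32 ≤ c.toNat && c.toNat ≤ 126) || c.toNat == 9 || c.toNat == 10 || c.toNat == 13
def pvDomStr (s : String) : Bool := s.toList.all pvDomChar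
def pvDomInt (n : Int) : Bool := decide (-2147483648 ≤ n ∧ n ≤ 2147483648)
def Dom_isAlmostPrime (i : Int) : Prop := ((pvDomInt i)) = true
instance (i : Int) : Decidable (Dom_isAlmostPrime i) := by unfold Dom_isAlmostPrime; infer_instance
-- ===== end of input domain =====

-- B drops A's factor dict: it divides out the first divisor found and returns whether the cofactor is 1 (prime-power test); simpler, early exit.

-- ===== PORT A =====
-- inner `while i % d == 0: factors[d] += 1; i //= d` (fuel only guards totality; never exhausted on the stated domain)
def pvInnerA : Nat → Int → Int → PySem.Dict Int Int → Int × PySem.Dict Int Int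
  | 0, i, _, f => (i, f)
  | fuel+1, i, d, f =>
      if PySem.Int.mod i d = 0 then
        pvInnerA fuel (PySem.Int.floordiv i d) d (f.modify d 0 (· + 1))
      else (i, f)

-- outer `while d*d <= i` loop
def pvOuterA : Nat → Int → Int → PySem.Dict Int Int → Int × PySem.Dict Int Int
  | 0, i, _, f => (i, f)
  | fuel+1, i, d, f =>
      if d * d ≤ i then
        let r := pvInnerA i.natAbs i d f
        pvOuterA fuel r.1 (d + 1) r.2
      else (i, f)

-- `if i > 1: factors[i] += 1`
def pvFinishA (r : Int × PySem.Dict Int Int) : PySem.Dict Int Int :=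
  if r.1 > 1 then r.2.modify r.1 0 (· + 1) else r.2

def isAlmostPrime (i : Int) : Bool :=
  (pvFinishA (pvOuterA (2 * i.natAbs + 2) i 2 PySem.Dict.empty)).size == 1

-- ===== PORT B =====
-- `while i % d == 0: i //= d`
def pvDivOutB : Nat → Int → Int → Int
  | 0, i, _ => i
  | fuel+1, i, d =>
      if PySem.Int.mod i d = 0 then pvDivOutB fuel (PySem.Int.floordiv i d) d else i

-- `while d*d <= i: if i % d == 0: …divide out, return i == 1; d += 1` and final `return i > 1`
def pvLoopB : Nat → Int → Int → Bool
  | 0, _, _ => false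
  | fuel+1, i, d =>
      if d * d ≤ i then
        if PySem.Int.mod i d = 0 then pvDivOutB i.natAbs i d == 1
        else pvLoopB fuel i (d + 1)
      else decide (i > 1)

def isAlmostPrime_alt (i : Int) : Bool := pvLoopB (2 * i.natAbs + 2) i 2

-- ===== PRECONDITION & SPEC =====
def Spec_isAlmostPrime (i : Int) (out : Bool) : Prop := out = isAlmostPrime_alt i
instance (i : Int) (out : Bool) : Decidable (Spec_isAlmostPrime i out) := by unfold Spec_isAlmostPrime; infer_instance

-- ===== CLAIM (what is proved, stated in full; the proofs are below) =====
def Claim_equal_isAlmostPrime : Prop := ∀ (i : Int), Dom_isAlmostPrime i → Spec_isAlmostPrime i (isAlmostPrime i)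

-- ===== LEMMAS AND PROOFS =====

theorem pvSize_eq (f : PySem.Dict Int Int) : f.size = f.keys.length := by
  simp [PySem.Dict.size, PySem.Dict.keys]

-- incrementing a key not yet present appends it
theorem pvKeys_modify_fresh (f : PySem.Dict Int Int) (d : Int) (h : d ∉ f.keys) :
    (f.modify d 0 (· + 1)).keys = f.keys ++ [d] := by
  have hc : f.contains d = false := by
    rw [← Bool.not_eq_true, PySem.Dict.contains_iff_mem_keys]; exact h
  rw [PySem.Dict.keys_modify, PySem.Dict.keys_insert_of_not_contains _ _ hc]

-- incrementing the same key twice adds no key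
theorem pvKeys_modify_modify (f : PySem.Dict Int Int) (d : Int) :
    ((f.modify d 0 (· + 1)).modify d 0 (· + 1)).keys = (f.modify d 0 (· + 1)).keys := by
  have hc : (f.modify d 0 (· + 1)).contains d = true := by
    simp [PySem.Dict.contains_modify]
  rw [PySem.Dict.keys_modify (f.modify d 0 (· + 1)),
    PySem.Dict.keys_insert_of_contains _ _ hc]

-- A's inner loop computes the same reduced cofactor as B's divide-out loop
theorem pvInnerA_fst (fuel : Nat) : ∀ (i d : Int) (f : PySem.Dict Int Int),
    (pvInnerA fuel i d f).1 = pvDivOutB fuel i d := by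
  induction fuel with
  | zero => intro i d f; rfl
  | succ n ih =>
      intro i d f
      simp only [pvInnerA, pvDivOutB]
      split <;> simp [ih]

-- when d does not divide i the inner loop is a no-op
theorem pvInnerA_stop (fuel : Nat) (i d : Int) (f : PySem.Dict Int Int)
    (hm : ¬ PySem.Int.mod i d = 0) : pvInnerA fuel i d f = (i, f) := by
  cases fuel <;> simp [pvInnerA, hm]

theorem pvDivOutB_spec (fuel : Nat) : ∀ (i d : Int), 2 ≤ d → 1 ≤ i → i.natAbs ≤ fuel →
    1 ≤ pvDivOutB fuel i d ∧ PySem.Int.mod (pvDivOutB fuel i d) d ≠ 0 ∧ pvDivOutB fuel i d ∣ i := by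
  induction fuel with
  | zero => intro i d hd hi hf; omega
  | succ n ih =>
      intro i d hd hi hf
      by_cases hm : PySem.Int.mod i d = 0
      · have hq := PySem.Int.floordiv_mul_add_mod i d
        rw [hm, add_zero] at hq
        set q := PySem.Int.floordiv i d with hqdef
        have hq1 : 1 ≤ q := by nlinarith
        have hqlt : q < i := by nlinarith
        have hfq : q.natAbs ≤ n := by omega
        obtain ⟨h1, h2, h3⟩ := ih q d hd hq1 hfq
        refine ⟨?_, ?_, ?_⟩ <;> simp only [pvDivOutB, if_pos hm, ← hqdef]
        · exact h1
        · exact h2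
        · exact h3.trans ⟨d, by linarith [hq]⟩
      · simp only [pvDivOutB, if_neg hm]
        exact ⟨hi, hm, dvd_refl i⟩

-- the inner loop touches only key d (and only when d divides i and there is fuel)
theorem pvInnerA_keys (fuel : Nat) : ∀ (i d : Int) (f : PySem.Dict Int Int),
    ((pvInnerA fuel i d f).2).keys =
      if 1 ≤ fuel ∧ PySem.Int.mod i d = 0 then (f.modify d 0 (· + 1)).keys else f.keys := by
  induction fuel with
  | zero => intro i d f; simp [pvInnerA]
  | succ n ih =>
      intro i d f
      by_cases hm : PySem.Int.mod i d = 0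
      · rw [show pvInnerA (n+1) i d f
            = pvInnerA n (PySem.Int.floordiv i d) d (f.modify d 0 (· + 1)) from by
          simp [pvInnerA, hm]]
        rw [ih,
          if_pos (show 1 ≤ n + 1 ∧ PySem.Int.mod i d = 0 from ⟨by omega, hm⟩)]
        split
        · exact pvKeys_modify_modify f d
        · rfl
      · simp [pvInnerA, hm]

-- one unfolding of the outer loop when the guard fails
theorem pvOuterA_stop (fuel : Nat) (i d : Int) (f : PySem.Dict Int Int)
    (hf : 1 ≤ fuel) (h : ¬ d * d ≤ i) : pvOuterA fuel i d f = (i, f) := by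
  cases fuel with
  | zero => omega
  | succ n => simp [pvOuterA, h]

-- once the dict is nonempty (mod-coprime to i) and 2 ≤ i, finishing A adds at least one key
theorem pvGrow (fuel : Nat) : ∀ (i d : Int) (f : PySem.Dict Int Int),
    2 ≤ d → 2 ≤ i → 1 ≤ fuel → 2 * (i.natAbs : Int) + 2 - d ≤ (fuel : Int) →
    (∀ e ∈ f.keys, PySem.Int.mod i e ≠ 0) →
    f.keys.length + 1 ≤ (pvFinishA (pvOuterA fuel i d f)).keys.length := by
  induction fuel with
  | zero => intro i d f hd hi hf hfb hinv; omega
  | succ n ih =>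
      intro i d f hd hi hf hfb hinv
      have habs : ((i.natAbs : Nat) : Int) = i := Int.natAbs_of_nonneg (by omega)
      rw [habs] at hfb
      by_cases hg : d * d ≤ i
      · have h2d : 2 * d ≤ i := by nlinarith
        have hn1 : 1 ≤ n := by push_cast at hfb; omega
        simp only [pvOuterA, if_pos hg]
        by_cases hm : PySem.Int.mod i d = 0
        · have hdnot : d ∉ f.keys := fun hmem => hinv d hmem hm
          have hkeys : ((pvInnerA i.natAbs i d f).2).keys = f.keys ++ [d] := by
            rw [pvInnerA_keys, if_pos ⟨by omega, hm⟩, pvKeys_modify_fresh f d hdnot]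
          have hfst : (pvInnerA i.natAbs i d f).1 = pvDivOutB i.natAbs i d :=
            pvInnerA_fst _ _ _ _
          obtain ⟨h11, h1m, h1dvd⟩ := pvDivOutB_spec i.natAbs i d hd (by omega) le_rfl
          have h1le : pvDivOutB i.natAbs i d ≤ i := Int.le_of_dvd (by omega) h1dvd
          rw [hfst]
          rcases eq_or_lt_of_le h11 with h1eq | h1gt
          · rw [pvOuterA_stop n _ (d + 1) _ hn1 (by rw [← h1eq]; nlinarith)]
            simp only [pvFinishA, if_neg (show ¬ pvDivOutB i.natAbs i d > 1 by omega)]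
            rw [hkeys]
            simp
          · have habs1 : ((pvDivOutB i.natAbs i d).natAbs : Int) = pvDivOutB i.natAbs i d :=
              Int.natAbs_of_nonneg (by omega)
            have hstep := ih (pvDivOutB i.natAbs i d) (d + 1) (pvInnerA i.natAbs i d f).2
              (by omega) (by omega) hn1
              (by rw [habs1]; push_cast at hfb ⊢; omega)
              (by
                intro e he hemod
                rw [hkeys, List.mem_append, List.mem_singleton] at he
                rcases he with he | he
                · exact hinv e he (by
                    rw [PySem.Int.mod_eq_zero_iff_dvd] at hemod ⊢
                    exact hemod.trans h1dvd)
                · subst he; exact h1m hemod)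
            rw [hkeys] at hstep
            simp only [List.length_append, List.length_singleton] at hstep
            omega
        · rw [pvInnerA_stop i.natAbs i d f hm]
          exact ih i (d + 1) f (by omega) hi hn1 (by rw [habs]; push_cast at hfb ⊢; omega) hinv
      · rw [pvOuterA_stop (n + 1) i d f (by omega) hg]
        have hnot : i ∉ f.keys := by
          intro hmem
          exact hinv i hmem ((PySem.Int.mod_eq_zero_iff_dvd i i).mpr (dvd_refl i))
        simp only [pvFinishA, if_pos (show i > 1 by omega)]
        rw [pvKeys_modify_fresh f i hnot]
        simp

-- lockstep: before any divisor is found both loops see the same (i, d)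
theorem pvMain (fuel : Nat) : ∀ (i d : Int),
    2 ≤ d → 1 ≤ fuel → 2 * (i.natAbs : Int) + 2 - d ≤ (fuel : Int) →
    ((pvFinishA (pvOuterA fuel i d PySem.Dict.empty)).size == 1) = pvLoopB fuel i d := by
  induction fuel with
  | zero => intro i d hd hf hfb; omega
  | succ n ih =>
      intro i d hd hf hfb
      by_cases hg : d * d ≤ i
      · have hi4 : 4 ≤ i := by nlinarith
        have h2d : 2 * d ≤ i := by nlinarith
        have habs : ((i.natAbs : Nat) : Int) = i := Int.natAbs_of_nonneg (by omega)
        rw [habs] at hfb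
        have hn1 : 1 ≤ n := by push_cast at hfb; omega
        simp only [pvOuterA, pvLoopB, if_pos hg]
        by_cases hm : PySem.Int.mod i d = 0
        · rw [if_pos hm]
          have hkeys : ((pvInnerA i.natAbs i d PySem.Dict.empty).2).keys = [d] := by
            rw [pvInnerA_keys, if_pos ⟨by omega, hm⟩,
              pvKeys_modify_fresh _ d (by simp [PySem.Dict.keys_empty])]
            simp [PySem.Dict.keys_empty]
          have hfst : (pvInnerA i.natAbs i d PySem.Dict.empty).1 = pvDivOutB i.natAbs i d :=
            pvInnerA_fst _ _ _ _
          obtain ⟨h11, h1m, h1dvd⟩ := pvDivOutB_spec i.natAbs i d hd (by omega) le_rfl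
          have h1le : pvDivOutB i.natAbs i d ≤ i := Int.le_of_dvd (by omega) h1dvd
          rw [hfst]
          rcases eq_or_lt_of_le h11 with h1eq | h1gt
          · rw [pvOuterA_stop n _ (d + 1) _ hn1 (by rw [← h1eq]; nlinarith)]
            simp only [pvFinishA, if_neg (show ¬ pvDivOutB i.natAbs i d > 1 by omega)]
            rw [pvSize_eq, hkeys]
            simp [← h1eq]
          · have hstep := pvGrow n (pvDivOutB i.natAbs i d) (d + 1)
              (pvInnerA i.natAbs i d PySem.Dict.empty).2
              (by omega) (by omega) hn1
              (by
                rw [Int.natAbs_of_nonneg (show (0:Int) ≤ pvDivOutB i.natAbs i d by omega)]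
                push_cast at hfb ⊢; omega)
              (by
                intro e he hemod
                rw [hkeys, List.mem_singleton] at he
                subst he; exact h1m hemod)
            rw [hkeys] at hstep
            simp only [List.length_singleton] at hstep
            rw [pvSize_eq]
            have hL : ((pvFinishA (pvOuterA n (pvDivOutB i.natAbs i d) (d + 1)
                (pvInnerA i.natAbs i d PySem.Dict.empty).2)).keys.length == 1) = false := by
              simp only [beq_eq_false_iff_ne, ne_eq]; omega
            have hR : (pvDivOutB i.natAbs i d == 1) = false := by
              simp only [beq_eq_false_iff_ne, ne_eq]; omega
            rw [hL, hR]
        · rw [if_neg hm, pvInnerA_stop i.natAbs i d PySem.Dict.empty hm]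
          exact ih i (d + 1) (by omega) hn1 (by rw [habs]; push_cast at hfb ⊢; omega)
      · rw [pvOuterA_stop (n + 1) i d _ (by omega) hg]
        simp only [pvLoopB, if_neg hg]
        by_cases h1 : i > 1
        · simp only [pvFinishA, if_pos h1]
          rw [pvSize_eq, pvKeys_modify_fresh _ i (by simp [PySem.Dict.keys_empty])]
          simp [PySem.Dict.keys_empty, h1]
        · simp only [pvFinishA, if_neg h1]
          rw [pvSize_eq]
          simp [PySem.Dict.keys_empty, h1]

-- ===== VERDICT (by name: the statement is the Claim_ definition above) =====
theorem isAlmostPrime_spec : Claim_equal_isAlmostPrime := by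
  intro i _
  show isAlmostPrime i = isAlmostPrime_alt i
  unfold isAlmostPrime isAlmostPrime_alt
  apply pvMain <;> omega
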